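-- pv_equiv track=rewrite | github.com/Choe-Useong/upbit-quant-research | lib/universe.py | _market_groups
-- ===== SOURCE A (Python) =====
-- from collections import defaultdict
--
-- def _market_groups(rows: list[dict[str, str]]) -> list[list[int]]:
--     grouped: dict[str, list[int]] = defaultdict(list)
--     for idx, row in enumerate(rows):
--         grouped[row["market"]].append(idx)
--     return [
--         sorted(indexes, key=lambda idx: rows[idx]["date_utc"])
--         for _, indexes in sorted(grouped.items())
--     ]
-- ===== SOURCE B (Python) =====
-- from itertools import groupby
--
-- def _market_groups(rows: list[dict[str, str]]) -> list[list[int]]: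
--     order = sorted(range(len(rows)),
--                    key=lambda i: (rows[i]["market"], rows[i]["date_utc"]))
--     return [list(g) for _, g in groupby(order, key=lambda i: rows[i]["market"])]
-- ===== Notes on version B (the rewrite author's own statement) =====
-- stated objective: alternative
-- what changed: Instead of bucketing indices into a defaultdict per market and sorting each bucket by date, B does one stable sort of all row indices by the composite key (market, date_utc) and then partitions the sorted sequence at market boundaries with itertools.groupby.
import Mathlib
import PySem

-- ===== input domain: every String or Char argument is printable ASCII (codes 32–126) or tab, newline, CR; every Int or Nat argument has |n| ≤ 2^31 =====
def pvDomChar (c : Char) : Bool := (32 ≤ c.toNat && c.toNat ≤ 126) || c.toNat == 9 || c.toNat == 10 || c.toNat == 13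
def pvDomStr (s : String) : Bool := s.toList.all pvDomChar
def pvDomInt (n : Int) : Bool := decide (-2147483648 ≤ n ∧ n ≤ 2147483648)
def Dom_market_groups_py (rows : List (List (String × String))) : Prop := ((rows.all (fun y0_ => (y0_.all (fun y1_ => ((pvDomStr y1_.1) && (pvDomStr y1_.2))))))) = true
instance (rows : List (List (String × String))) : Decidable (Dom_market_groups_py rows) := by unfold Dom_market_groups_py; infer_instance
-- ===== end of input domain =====

-- B replaces A's bucket-per-market defaultdict + per-bucket sort by one stable sort of all
-- indices under the composite key (market, date_utc) followed by partitioning the sorted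
-- sequence at market boundaries (itertools.groupby); same O(n log n) cost, different structure.

-- ===== PORT A =====
-- row["k"]: a Python dict is PySem.Dict built from the pair list (later duplicates overwrite);
-- the getD default "" is never reached under Pre_ (Python raises KeyError there).
-- sorted(grouped.items()) compares (key, value) tuples, but dict keys are distinct, so
-- sorting by the key alone is exact.
def market_groups_py (rows : List (List (String × String))) : List (List Int) :=
  let grouped : PySem.Dict String (List Int) :=
    (PySem.List.enumerate rows).foldl
      (fun d p => d.modify ((PySem.Dict.ofList p.2).getD "market" "") [] (fun v => v ++ [p.1]))
      PySem.Dict.empty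
  (PySem.List.sorted grouped.items (fun kv => kv.1)).map
    (fun kv => PySem.List.sorted kv.2
      (fun idx => (PySem.Dict.ofList (PySem.List.pyGetD rows idx [])).getD "date_utc" ""))

-- ===== PORT B =====
-- rows[i]["k"] (index always in range; getD default never reached under Pre_)
def pvRowGet (rows : List (List (String × String))) (i : Int) (k : String) : String :=
  (PySem.Dict.ofList (PySem.List.pyGetD rows i [])).getD k ""

-- itertools.groupby(l, key=f) restricted to what B consumes: the list of maximal runs of
-- equal key values (hand-ported; no PySem/Mathlib counterpart matches groupby exactly)
def pvRunsBy (f : Int → String) : List Int → List (List Int)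
  | [] => []
  | x :: xs =>
    match pvRunsBy f xs with
    | [] => [[x]]
    | g :: gs => if f x == f (g.headD 0) then (x :: g) :: gs else [x] :: g :: gs

def market_groups_py_alt (rows : List (List (String × String))) : List (List Int) :=
  let order := PySem.List.sorted2 (PySem.List.pyRange 0 (PySem.List.len rows) 1)
      (fun i => pvRowGet rows i "market") (fun i => pvRowGet rows i "date_utc")
  pvRunsBy (fun i => pvRowGet rows i "market") order

-- ===== PRECONDITION & SPEC =====
-- Pre_ excludes exactly the inputs where Python A raises KeyError: some row lacking the
-- key "market" or the key "date_utc" (B raises KeyError there too).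
def Pre_market_groups_py (rows : List (List (String × String))) : Prop :=
  ∀ row ∈ rows, (row.any (fun p => p.1 == "market")) = true ∧ (row.any (fun p => p.1 == "date_utc")) = true
instance (rows : List (List (String × String))) : Decidable (Pre_market_groups_py rows) := by unfold Pre_market_groups_py; infer_instance

def pvWitness_market_groups_py : (List (List (String × String))) :=
  [[("market", "KRW-BTC"), ("date_utc", "2020-01-02")],
   [("market", "KRW-ETH"), ("date_utc", "2020-01-01")],
   [("market", "KRW-BTC"), ("date_utc", "2020-01-01")]]

def Spec_market_groups_py (rows : List (List (String × String))) (out : List (List Int)) : Prop := out = market_groups_py_alt rows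
instance (rows : List (List (String × String))) (out : List (List Int)) : Decidable (Spec_market_groups_py rows out) := by unfold Spec_market_groups_py; infer_instance

-- ===== CLAIM (what is proved, stated in full; the proofs are below) =====
def Claim_equal_market_groups_py : Prop := ∀ (rows : List (List (String × String))), Dom_market_groups_py rows → Pre_market_groups_py rows → Spec_market_groups_py rows (market_groups_py rows)

-- ===== LEMMAS AND PROOFS =====

-- abbreviations used only by the proofs
def pvMkt (rows : List (List (String × String))) (i : Int) : String := pvRowGet rows i "market"
def pvDte (rows : List (List (String × String))) (i : Int) : String := pvRowGet rows i "date_utc"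
def pvR (rows : List (List (String × String))) : List Int := PySem.List.pyRange 0 (PySem.List.len rows) 1
def pvIdx (rows : List (List (String × String))) (m : String) : List Int :=
  (pvR rows).filter (fun i => pvMkt rows i == m)
def pvKeys (rows : List (List (String × String))) : List String :=
  PySem.Set.ofList ((pvR rows).map (pvMkt rows))
def pvMs (rows : List (List (String × String))) : List String :=
  PySem.List.sorted (pvKeys rows) (fun m => m)
-- the strict order realised by B's composite-key stable sort
def pvLex (rows : List (List (String × String))) (a b : Int) : Prop :=
  pvMkt rows a < pvMkt rows b ∨ (pvMkt rows a = pvMkt rows b ∧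
    (pvDte rows a < pvDte rows b ∨ (pvDte rows a = pvDte rows b ∧ a < b)))

-- insertion step of PySem's stable insertion sort preserves pairwise r

theorem pv_insertBy_spec {before : Int → Int → Bool} {r : Int → Int → Prop}
    (htr : ∀ a b c : Int, r a b → r b c → r a c) (x : Int) :
    ∀ (l : List Int),
      (∀ y ∈ l, before x y = true → r x y) →
      (∀ y ∈ l, before x y = false → r y x) →
      l.Pairwise r →
      (PySem.List.insertBy before x l).Pairwise r ∧ (PySem.List.insertBy before x l).Perm (x :: l) := by
  intro l
  induction l with
  | nil => intro _ _ _; simp [PySem.List.insertBy]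
  | cons y ys ih =>
    intro h1 h2 hp
    rw [List.pairwise_cons] at hp
    by_cases hb : before x y = true
    · rw [PySem.List.insertBy, if_pos hb]
      refine ⟨List.pairwise_cons.mpr ⟨?_, List.pairwise_cons.mpr ⟨hp.1, hp.2⟩⟩, List.Perm.refl _⟩
      intro z hz
      rcases List.mem_cons.mp hz with hz | hz
      · subst hz; exact h1 _ (by simp) hb
      · exact htr _ _ _ (h1 _ (by simp) hb) (hp.1 z hz)
    · rw [PySem.List.insertBy, if_neg hb]
      have ih' := ih (fun z hz h => h1 z (by simp [hz]) h) (fun z hz h => h2 z (by simp [hz]) h) hp.2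
      refine ⟨List.pairwise_cons.mpr ⟨?_, ih'.1⟩, ?_⟩
      · intro z hz
        have : z ∈ x :: ys := ih'.2.mem_iff.mp hz
        rcases List.mem_cons.mp this with hz' | hz'
        · subst hz'; exact h2 _ (by simp) (by simpa using hb)
        · exact hp.1 z hz'
      · exact (ih'.2.cons y).trans (List.Perm.swap x y ys)

theorem pv_foldl_insertBy_spec {before : Int → Int → Bool} {r : Int → Int → Prop}
    (htr : ∀ a b c : Int, r a b → r b c → r a c)
    (hb1 : ∀ a b : Int, before a b = true → r a b)
    (hb2 : ∀ a b : Int, before a b = false → b < a → r b a) :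
    ∀ (xs acc : List Int), acc.Pairwise r → (∀ a ∈ acc, ∀ b ∈ xs, a < b) → xs.Pairwise (· < ·) →
      ((xs.foldl (fun acc x => PySem.List.insertBy before x acc) acc).Pairwise r ∧
       (xs.foldl (fun acc x => PySem.List.insertBy before x acc) acc).Perm (acc ++ xs)) := by
  intro xs
  induction xs with
  | nil => intro acc hp _ _; simpa using hp
  | cons x xs ih =>
    intro acc hp hcross hxs
    rw [List.pairwise_cons] at hxs
    simp only [List.foldl_cons]
    have hins := pv_insertBy_spec htr x acc
      (fun y _ h => hb1 x y h)
      (fun y hy h => hb2 x y h (hcross y hy x (by simp)))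
      hp
    have hcross' : ∀ a ∈ PySem.List.insertBy before x acc, ∀ b ∈ xs, a < b := by
      intro a ha b hb
      have : a ∈ x :: acc := hins.2.mem_iff.mp ha
      rcases List.mem_cons.mp this with h | h
      · subst h; exact hxs.1 b hb
      · exact hcross a h b (by simp [hb])
    have := ih (PySem.List.insertBy before x acc) hins.1 hcross' hxs.2
    exact ⟨this.1, this.2.trans ((hins.2.append_right xs).trans (List.perm_middle).symm)⟩

theorem pv_sorted_spec (key : Int → String) (xs : List Int) (h : xs.Pairwise (· < ·)) :
    (PySem.List.sorted xs key).Pairwise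
      (fun a b => key a < key b ∨ (key a = key b ∧ a < b)) ∧
    (PySem.List.sorted xs key).Perm xs := by
  rw [PySem.List.sorted_eq_foldl_insertBy]
  have := pv_foldl_insertBy_spec
    (r := fun a b => key a < key b ∨ (key a = key b ∧ a < b))
    (before := fun a b => decide (key a < key b))
    (by
      intro a b c hab hbc
      rcases hab with hab | ⟨e1, hab⟩ <;> rcases hbc with hbc | ⟨e2, hbc⟩
      · exact Or.inl (lt_trans hab hbc)
      · exact Or.inl (e2 ▸ hab)
      · exact Or.inl (e1 ▸ hbc)
      · exact Or.inr ⟨e1.trans e2, lt_trans hab hbc⟩)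
    (by intro a b hb; exact Or.inl (of_decide_eq_true hb))
    (by
      intro a b hb hlt
      have : ¬ key a < key b := of_decide_eq_false hb
      rcases lt_or_eq_of_le (le_of_not_gt this) with h' | h'
      · exact Or.inl h'
      · exact Or.inr ⟨h', hlt⟩)
    xs [] (by simp) (by simp) h
  simpa using this

theorem pv_sorted2_spec (k1 k2 : Int → String) (xs : List Int) (h : xs.Pairwise (· < ·)) :
    (PySem.List.sorted2 xs k1 k2).Pairwise
      (fun a b => k1 a < k1 b ∨ (k1 a = k1 b ∧ (k2 a < k2 b ∨ (k2 a = k2 b ∧ a < b)))) ∧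
    (PySem.List.sorted2 xs k1 k2).Perm xs := by
  have hdef : PySem.List.sorted2 xs k1 k2 =
      xs.foldl (fun acc x => PySem.List.insertBy
        (fun a b => decide (k1 a < k1 b) || (!decide (k1 b < k1 a) && decide (k2 a < k2 b))) x acc) [] := rfl
  rw [hdef]
  have := pv_foldl_insertBy_spec
    (r := fun a b => k1 a < k1 b ∨ (k1 a = k1 b ∧ (k2 a < k2 b ∨ (k2 a = k2 b ∧ a < b))))
    (before := fun a b => decide (k1 a < k1 b) || (!decide (k1 b < k1 a) && decide (k2 a < k2 b)))
    (by
      intro a b c hab hbc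
      rcases hab with hab | ⟨e1, hab⟩ <;> rcases hbc with hbc | ⟨e2, hbc⟩
      · exact Or.inl (lt_trans hab hbc)
      · exact Or.inl (e2 ▸ hab)
      · exact Or.inl (e1 ▸ hbc)
      · refine Or.inr ⟨e1.trans e2, ?_⟩
        rcases hab with hab | ⟨f1, hab⟩ <;> rcases hbc with hbc | ⟨f2, hbc⟩
        · exact Or.inl (lt_trans hab hbc)
        · exact Or.inl (f2 ▸ hab)
        · exact Or.inl (f1 ▸ hbc)
        · exact Or.inr ⟨f1.trans f2, lt_trans hab hbc⟩)
    (by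
      intro a b hb
      rcases Bool.or_eq_true_iff.mp hb with hb | hb
      · exact Or.inl (of_decide_eq_true hb)
      · rcases Bool.and_eq_true_iff.mp hb with ⟨hb1, hb2⟩
        have h1 : ¬ k1 b < k1 a := of_decide_eq_true (by simpa using hb1)
        rcases lt_or_eq_of_le (le_of_not_gt h1) with h' | h'
        · exact Or.inl h'
        · exact Or.inr ⟨h', Or.inl (of_decide_eq_true hb2)⟩)
    (by
      intro a b hb hlt
      rw [Bool.or_eq_false_iff] at hb
      have h1 : ¬ k1 a < k1 b := of_decide_eq_false hb.1
      rcases lt_or_eq_of_le (le_of_not_gt h1) with h' | h'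
      · exact Or.inl h'
      · refine Or.inr ⟨h', ?_⟩
        rw [Bool.and_eq_false_iff] at hb
        rcases hb.2 with hb2 | hb2
        · have hx := of_decide_eq_true (p := k1 b < k1 a) (by simpa using hb2)
          rw [h'] at hx
          exact absurd hx (lt_irrefl _)
        · have h2 : ¬ k2 a < k2 b := of_decide_eq_false hb2
          rcases lt_or_eq_of_le (le_of_not_gt h2) with h'' | h''
          · exact Or.inl h''
          · exact Or.inr ⟨h'', hlt⟩)
    xs [] (by simp) (by simp) h
  simpa using this



-- stability of the date-only per-bucket sort on a strictly increasing index list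

-- stability of the composite-key sort on a strictly increasing index list

-- A's result, characterised: sorted distinct markets, each mapped to its date-sorted bucket
theorem pvMs_lt (rows : List (List (String × String))) : (pvMs rows).Pairwise (· < ·) := by
  have h1 : (pvMs rows).Pairwise (· ≤ ·) := by
    simpa using PySem.List.sorted_pairwise (pvKeys rows) (fun m => m)
  have h2 : (pvMs rows).Nodup :=
    ((PySem.List.sorted_perm (pvKeys rows) (fun m => m) false).nodup_iff).mpr
      (PySem.Set.nodup_ofList _)
  exact (h1.and h2).imp (fun h => lt_of_le_of_ne h.1 h.2)

theorem pvIdx_lt (rows : List (List (String × String))) (m : String) :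
    (pvIdx rows m).Pairwise (· < ·) :=
  (PySem.List.pairwise_lt_pyRange_one 0 (PySem.List.len rows)).filter _

theorem pvIdx_mem (rows : List (List (String × String))) (m : String) (i : Int)
    (h : i ∈ pvIdx rows m) : pvMkt rows i = m := by
  have := List.of_mem_filter h
  simpa using this

theorem pvMs_mem_ne_nil (rows : List (List (String × String))) (m : String)
    (h : m ∈ pvMs rows) : pvIdx rows m ≠ [] := by
  have hm : m ∈ pvKeys rows := (PySem.List.sorted_perm (pvKeys rows) (fun m => m) false).mem_iff.mp h
  have : m ∈ (pvR rows).map (pvMkt rows) := (PySem.Set.mem_ofList _ _).mp hm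
  rcases List.mem_map.mp this with ⟨i, hi, rfl⟩
  intro hnil
  have hmem : i ∈ pvIdx rows (pvMkt rows i) := List.mem_filter.mpr ⟨hi, by simp⟩
  rw [hnil] at hmem
  exact absurd hmem (List.not_mem_nil)

theorem pvA_eq (rows : List (List (String × String))) :
    market_groups_py rows =
      (pvMs rows).map (fun m => PySem.List.sorted (pvIdx rows m) (pvDte rows)) := by
  show (PySem.List.sorted
      ((PySem.List.enumerate rows).foldl
        (fun d p => d.modify ((PySem.Dict.ofList p.2).getD "market" "") [] (fun v => v ++ [p.1]))
        PySem.Dict.empty).items (fun kv => kv.1)).map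
      (fun kv => PySem.List.sorted kv.2
        (fun idx => (PySem.Dict.ofList (PySem.List.pyGetD rows idx [])).getD "date_utc" "")) = _
  have hfold : (PySem.List.enumerate rows).foldl
      (fun d p => d.modify ((PySem.Dict.ofList p.2).getD "market" "") [] (fun v => v ++ [p.1]))
      PySem.Dict.empty
      = ((pvR rows).map (fun j => (pvMkt rows j, j))).foldl
          (fun d p => d.modify p.1 [] (fun v => v ++ [p.2])) PySem.Dict.empty := by
    rw [PySem.List.enumerate_eq_map_pyRange rows [], List.foldl_map, List.foldl_map]
    rfl
  rw [hfold]
  set d := ((pvR rows).map (fun j => (pvMkt rows j, j))).foldl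
      (fun d p => d.modify p.1 [] (fun v => v ++ [p.2])) PySem.Dict.empty with hd
  have hkeys : d.keys = pvKeys rows := by
    rw [hd, List.foldl_map]
    rw [PySem.Dict.keys_foldl_modify_key (pvR rows) (pvMkt rows) []
      (fun _ x => fun v => v ++ [x]) PySem.Dict.empty]
    rw [PySem.Dict.keys_empty]
    rfl
  have hnodup : d.keys.Nodup := by
    rw [hkeys]; exact PySem.Set.nodup_ofList _
  have hgetD : ∀ m, d.getD m [] = pvIdx rows m := by
    intro m
    rw [hd, PySem.Dict.getD_foldl_modify_append]
    simp [List.filter_map, pvIdx, Function.comp_def]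
  have hitems : d.items = (pvKeys rows).map (fun m => (m, pvIdx rows m)) := by
    rw [PySem.Dict.items_eq_map_keys d hnodup [], hkeys]
    exact List.map_congr_left (fun m _ => by rw [hgetD m])
  rw [hitems]
  have hs : PySem.List.sorted ((pvKeys rows).map (fun m => (m, pvIdx rows m))) (fun kv => kv.1)
      = (pvMs rows).map (fun m => (m, pvIdx rows m)) := by
    apply PySem.List.sorted_eq_of_perm_of_pairwise_lt
    · exact (PySem.List.sorted_perm (pvKeys rows) (fun m => m) false).map _
    · exact List.pairwise_map.mpr (pvMs_lt rows)
  rw [hs, List.map_map]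
  rfl

-- the filters over the distinct key values partition the list
theorem pv_partition_perm (f : Int → String) :
    ∀ (ks : List String) (l : List Int), ks.Nodup → (∀ i ∈ l, f i ∈ ks) →
      ((ks.map (fun m => l.filter (fun i => f i == m))).flatten).Perm l := by
  intro ks
  induction ks with
  | nil =>
    intro l _ h
    cases l with
    | nil => simp
    | cons a l => exact absurd (h a (by simp)) (by simp)
  | cons k ks ih =>
    intro l hnd h
    simp only [List.map_cons, List.flatten_cons]
    have hrw : ks.map (fun m => l.filter (fun i => f i == m)) =
        ks.map (fun m => (l.filter (fun i => !(f i == k))).filter (fun i => f i == m)) := by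
      apply List.map_congr_left
      intro m hm
      rw [List.filter_filter]
      apply List.filter_congr
      intro i _
      by_cases he : f i = m
      · have hmk : ¬ m = k := fun e => (List.nodup_cons.mp hnd).1 (e ▸ hm)
        simp [he, hmk]
      · simp [he]
    rw [hrw]
    have hsub := ih (l.filter (fun i => !(f i == k))) (List.nodup_cons.mp hnd).2 ?_
    · exact (List.Perm.append_left _ hsub).trans (List.filter_append_perm _ l)
    · intro i hi
      have h1 := List.mem_of_mem_filter hi
      have h2 := List.of_mem_filter hi
      rcases List.mem_cons.mp (h i h1) with he | he
      · simp [he] at h2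
      · exact he

theorem pv_flatten_map_perm {l : List String} (g h : String → List Int)
    (hs : ∀ m ∈ l, (g m).Perm (h m)) : ((l.map g).flatten).Perm ((l.map h).flatten) := by
  induction l with
  | nil => simp
  | cons m l ih =>
    simp only [List.map_cons, List.flatten_cons]
    exact (hs m (by simp)).append (ih (fun m' hm' => hs m' (by simp [hm'])))

-- B's sorted order is exactly the concatenation of A's groups
theorem pvOrder_eq (rows : List (List (String × String))) :
    PySem.List.sorted2 (pvR rows) (pvMkt rows) (pvDte rows) =
      ((pvMs rows).map (fun m => PySem.List.sorted (pvIdx rows m) (pvDte rows))).flatten := by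
  have hR : (pvR rows).Pairwise (· < ·) := PySem.List.pairwise_lt_pyRange_one 0 (PySem.List.len rows)
  have hspec2 := pv_sorted2_spec (pvMkt rows) (pvDte rows) (pvR rows) hR
  apply List.eq_of_perm_of_sorted (le := pvLex rows)
  · intro a b _ _ hab hba
    exfalso
    rcases hab with hab | ⟨e1, hab⟩ <;> rcases hba with hba | ⟨e2, hba⟩
    · exact lt_asymm hab hba
    · exact absurd (e2 ▸ hab) (lt_irrefl _)
    · exact absurd (e1 ▸ hba) (lt_irrefl _)
    · rcases hab with hab | ⟨f1, hab⟩ <;> rcases hba with hba | ⟨f2, hba⟩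
      · exact lt_asymm hab hba
      · exact absurd (f2 ▸ hab) (lt_irrefl _)
      · exact absurd (f1 ▸ hba) (lt_irrefl _)
      · omega
  · exact hspec2.1
  · rw [List.pairwise_flatten]
    constructor
    · intro l hl
      rcases List.mem_map.mp hl with ⟨m, hm, rfl⟩
      have hg := pv_sorted_spec (pvDte rows) (pvIdx rows m) (pvIdx_lt rows m)
      refine List.Pairwise.imp_of_mem ?_ hg.1
      intro a b ha hb hr
      have hma : pvMkt rows a = m := pvIdx_mem rows m a (hg.2.mem_iff.mp ha)
      have hmb : pvMkt rows b = m := pvIdx_mem rows m b (hg.2.mem_iff.mp hb)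
      exact Or.inr ⟨hma.trans hmb.symm, hr⟩
    · refine List.pairwise_map.mpr ((pvMs_lt rows).imp ?_)
      intro m1 m2 hlt x hx y hy
      have h1 := pvIdx_mem rows m1 x ((pv_sorted_spec (pvDte rows) (pvIdx rows m1) (pvIdx_lt rows m1)).2.mem_iff.mp hx)
      have h2 := pvIdx_mem rows m2 y ((pv_sorted_spec (pvDte rows) (pvIdx rows m2) (pvIdx_lt rows m2)).2.mem_iff.mp hy)
      exact Or.inl (by rw [h1, h2]; exact hlt)
  · refine hspec2.2.trans ?_
    have step1 : (((pvMs rows).map (fun m => PySem.List.sorted (pvIdx rows m) (pvDte rows))).flatten).Perm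
        (((pvMs rows).map (fun m => pvIdx rows m)).flatten) :=
      pv_flatten_map_perm _ _ (fun m _ => (pv_sorted_spec (pvDte rows) (pvIdx rows m) (pvIdx_lt rows m)).2)
    have step2 : (((pvMs rows).map (fun m => pvIdx rows m)).flatten).Perm
        (((pvKeys rows).map (fun m => pvIdx rows m)).flatten) :=
      ((PySem.List.sorted_perm (pvKeys rows) (fun m => m) false).map _).flatten
    have step3 : (((pvKeys rows).map (fun m => pvIdx rows m)).flatten).Perm (pvR rows) := by
      have := pv_partition_perm (pvMkt rows) (pvKeys rows) (pvR rows)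
        (PySem.Set.nodup_ofList _) ?_
      · exact this
      · intro i hi
        exact (PySem.Set.mem_ofList _ _).mpr (List.mem_map.mpr ⟨i, hi, rfl⟩)
    exact ((step1.trans step2).trans step3).symm

-- grouping a concatenation of nonempty constant-key blocks with pairwise-distinct keys
theorem pv_runs_head (f : Int → String) (x : Int) (xs : List Int) :
    ∃ t gs, pvRunsBy f (x :: xs) = (x :: t) :: gs := by
  have hstep : pvRunsBy f (x :: xs) =
      match pvRunsBy f xs with
      | [] => [[x]]
      | g :: gs => if f x == f (g.headD 0) then (x :: g) :: gs else [x] :: g :: gs := rfl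
  cases h : pvRunsBy f xs with
  | nil => exact ⟨[], [], by rw [hstep, h]⟩
  | cons g gs =>
    cases hb : (f x == f (g.headD 0)) with
    | true => exact ⟨g, gs, by rw [hstep, h]; simp only [hb]; rfl⟩
    | false => exact ⟨[], g :: gs, by rw [hstep, h]; simp only [hb]; rfl⟩

theorem pv_runs_append (f : Int → String) (c : String) :
    ∀ (g l : List Int), g ≠ [] → (∀ i ∈ g, f i = c) → (∀ y t, l = y :: t → f y ≠ c) →
      pvRunsBy f (g ++ l) = g :: pvRunsBy f l := by
  intro g
  induction g with
  | nil => intro l h; exact absurd rfl h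
  | cons a g ih =>
    intro l _ hc hl
    cases g with
    | nil =>
      cases l with
      | nil => simp [pvRunsBy]
      | cons y t =>
        rcases pv_runs_head f y t with ⟨t', gs, hh⟩
        have hne : (f a == f y) = false := by
          rw [beq_eq_false_iff_ne]
          intro e
          exact (hl y t rfl) (e.symm.trans (hc a (by simp)))
        have hstep : pvRunsBy f (a :: y :: t) =
            match pvRunsBy f (y :: t) with
            | [] => [[a]]
            | g :: gs => if f a == f (g.headD 0) then (a :: g) :: gs else [a] :: g :: gs := rfl
        show pvRunsBy f (a :: y :: t) = [a] :: pvRunsBy f (y :: t)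
        rw [hstep, hh]
        simp [hne]
    | cons b g' =>
      have hrec := ih l (by simp) (fun i hi => hc i (by simp at hi ⊢; tauto)) hl
      have hstep : pvRunsBy f (a :: ((b :: g') ++ l)) =
          match pvRunsBy f ((b :: g') ++ l) with
          | [] => [[a]]
          | g :: gs => if f a == f (g.headD 0) then (a :: g) :: gs else [a] :: g :: gs := rfl
      show pvRunsBy f (a :: ((b :: g') ++ l)) = (a :: b :: g') :: pvRunsBy f l
      rw [hstep, hrec]
      have hfa : f a = f b := (hc a (by simp)).trans (hc b (by simp)).symm
      simp [hfa]

theorem pv_runs_flatten (f : Int → String) (G : String → List Int) :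
    ∀ (ms : List String), ms.Pairwise (· ≠ ·) →
      (∀ m ∈ ms, G m ≠ [] ∧ ∀ i ∈ G m, f i = m) →
      pvRunsBy f ((ms.map G).flatten) = ms.map G := by
  intro ms
  induction ms with
  | nil => intro _ _; simp [pvRunsBy]
  | cons m ms ih =>
    intro hp hG
    have h1 := hG m (by simp)
    simp only [List.map_cons, List.flatten_cons]
    have happ := pv_runs_append f m (G m) ((ms.map G).flatten) h1.1 h1.2 ?_
    · rw [happ, ih (List.pairwise_cons.mp hp).2 (fun m' hm' => hG m' (by simp [hm']))]
    · intro y t hyt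
      have hy : y ∈ (ms.map G).flatten := by rw [hyt]; simp
      rcases List.mem_flatten.mp hy with ⟨l, hl, hyl⟩
      rcases List.mem_map.mp hl with ⟨m', hm', rfl⟩
      have hfy : f y = m' := (hG m' (by simp [hm'])).2 y hyl
      rw [hfy]
      exact ((List.pairwise_cons.mp hp).1 m' hm').symm

-- ===== VERDICT (by name: the statement is the Claim_ definition above) =====
theorem market_groups_py_spec : Claim_equal_market_groups_py := by
  intro rows _ _
  unfold Spec_market_groups_py
  rw [pvA_eq]
  have halt : market_groups_py_alt rows =
      pvRunsBy (pvMkt rows) (PySem.List.sorted2 (pvR rows) (pvMkt rows) (pvDte rows)) := rfl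
  rw [halt, pvOrder_eq]
  refine (pv_runs_flatten (pvMkt rows)
    (fun m => PySem.List.sorted (pvIdx rows m) (pvDte rows)) (pvMs rows)
    ((pvMs_lt rows).imp (fun h => ne_of_lt h)) ?_).symm
  intro m hm
  refine ⟨?_, ?_⟩
  · rw [Ne, PySem.List.sorted_eq_nil_iff]
    exact pvMs_mem_ne_nil rows m hm
  · intro i hi
    exact pvIdx_mem rows m i
      ((pv_sorted_spec (pvDte rows) (pvIdx rows m) (pvIdx_lt rows m)).2.mem_iff.mp hi)
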